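-- pv_equiv track=rewrite | github.com/lppl/hexmap | hexmap/grid.py | points_in_circle
-- ===== SOURCE A (Python) =====
-- directions = (( 1,  1),
--               ( 1,  0),
--               ( 0, -1),
--               (-1, -1),
--               (-1,  0),
--               ( 0,  1))
--
-- def points_in_circle(c, d):
--     """Returns list of points in circle from given center"""
--     if d == 0:
--         return set((c,))
--     circle = set()
--     x, y = (c[0] + d * directions[4][0], c[1] + d * directions[4][1])
--     for m in directions:
--         for i in range(1, d + 1):
--             x, y = x + m[0], y + m[1]
--             circle.add((x, y))
--     return circle
-- ===== SOURCE B (Python) =====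
-- def points_in_circle(c, d):
--     """Returns list of points in circle from given center"""
--     if d == 0:
--         return set((c,))
--     directions = ((1, 1), (1, 0), (0, -1), (-1, -1), (-1, 0), (0, 1))
--     # prefix sums of directions[0..m-1]: corner_m = (c0 + d*(p0-1), c1 + d*p1)
--     prefixes = ((0, 0), (1, 1), (2, 1), (2, 0), (1, -1), (0, -1))
--     pts = []
--     for (px, py), (mx, my) in zip(prefixes, directions):
--         bx, by = c[0] + d * (px - 1), c[1] + d * py
--         for i in range(1, d + 1):
--             pts.append((bx + i * mx, by + i * my))
--     return set(pts)
-- ===== Notes on version B (the rewrite author's own statement) =====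
-- stated objective: alternative
-- what changed: B computes each of the six ring edges independently from a closed-form corner vertex (center + d times a precomputed prefix-sum of the directions) instead of threading one running (x,y) cursor through the whole walk, collecting the points in a list and building the set once at the end.
import Mathlib
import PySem

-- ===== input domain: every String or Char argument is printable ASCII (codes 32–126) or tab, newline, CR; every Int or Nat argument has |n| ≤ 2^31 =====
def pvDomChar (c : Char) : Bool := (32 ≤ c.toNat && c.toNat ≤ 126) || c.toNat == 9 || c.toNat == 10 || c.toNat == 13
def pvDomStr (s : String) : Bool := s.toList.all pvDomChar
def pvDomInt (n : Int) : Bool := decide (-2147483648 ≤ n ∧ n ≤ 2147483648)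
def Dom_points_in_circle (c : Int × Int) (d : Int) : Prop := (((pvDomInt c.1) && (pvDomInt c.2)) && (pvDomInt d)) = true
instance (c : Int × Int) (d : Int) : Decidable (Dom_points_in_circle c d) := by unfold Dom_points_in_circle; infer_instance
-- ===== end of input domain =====

-- B computes each ring edge independently from closed-form corner vertices (no running cursor);
-- same set, same insertion order. Objective: alternative decomposition, same O(d) cost.

-- ===== PORT A =====
-- module constant `directions`
def pvDirs : List (Int × Int) := [(1, 1), (1, 0), (0, -1), (-1, -1), (-1, 0), (0, 1)]

-- one step of A's inner loop: advance the cursor and add it to the set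
def pvStepA (m : Int × Int) (st : (Int × Int) × PySem.Set (Int × Int)) :
    (Int × Int) × PySem.Set (Int × Int) :=
  ((st.1.1 + m.1, st.1.2 + m.2), PySem.Set.add st.2 (st.1.1 + m.1, st.1.2 + m.2))

def points_in_circle (c : Int × Int) (d : Int) : List (Int × Int) :=
  if d = 0 then PySem.Set.ofList [c]
  else
    -- x, y = c[0] + d*directions[4][0], c[1] + d*directions[4][1]  (directions[4] = (-1, 0))
    let x0 := c.1 + d * (PySem.List.pyGetD pvDirs 4 (0, 0)).1
    let y0 := c.2 + d * (PySem.List.pyGetD pvDirs 4 (0, 0)).2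
    (pvDirs.foldl
      (fun st m => (PySem.List.pyRange 1 (d + 1) 1).foldl (fun st2 _ => pvStepA m st2) st)
      ((x0, y0), PySem.Set.empty)).2

-- ===== PORT B =====
-- zip(prefixes, directions): (prefix-sum of directions[0..m-1], directions[m])
def pvEdges : List ((Int × Int) × (Int × Int)) :=
  [((0, 0), (1, 1)), ((1, 1), (1, 0)), ((2, 1), (0, -1)),
   ((2, 0), (-1, -1)), ((1, -1), (-1, 0)), ((0, -1), (0, 1))]

def points_in_circle_alt (c : Int × Int) (d : Int) : List (Int × Int) :=
  if d = 0 then PySem.Set.ofList [c]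
  else
    PySem.Set.ofList (pvEdges.flatMap (fun e =>
      (PySem.List.pyRange 1 (d + 1) 1).map (fun i =>
        (c.1 + d * (e.1.1 - 1) + i * e.2.1, c.2 + d * e.1.2 + i * e.2.2))))

-- ===== PRECONDITION & SPEC =====
def Spec_points_in_circle (c : Int × Int) (d : Int) (out : List (Int × Int)) : Prop := out = points_in_circle_alt c d
instance (c : Int × Int) (d : Int) (out : List (Int × Int)) : Decidable (Spec_points_in_circle c d out) := by unfold Spec_points_in_circle; infer_instance

-- ===== CLAIM (what is proved, stated in full; the proofs are below) =====
def Claim_equal_points_in_circle : Prop := ∀ (c : Int × Int) (d : Int), Dom_points_in_circle c d → Spec_points_in_circle c d (points_in_circle c d)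

-- ===== LEMMAS AND PROOFS =====

lemma pv_foldl_add_congr (s t : PySem.Set (Int × Int)) (l1 l2 : List (Int × Int))
    (hs : s = t) (hl : l1 = l2) :
    l1.foldl PySem.Set.add s = l2.foldl PySem.Set.add t := by rw [hs, hl]

-- A's inner loop over a length-n range: cursor advances n·m and the walked points are appended.
lemma pv_innerA (m : Int × Int) (n : Nat) : ∀ (x y : Int) (s : PySem.Set (Int × Int)),
    (List.range n).foldl (fun st2 (_ : Nat) => pvStepA m st2) ((x, y), s)
      = ((x + n * m.1, y + n * m.2),
         PySem.Set.update s ((List.range n).map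
           (fun (k : Nat) => (x + ((k : Int) + 1) * m.1, y + ((k : Int) + 1) * m.2)))) := by
  induction n with
  | zero => intro x y s; simp [PySem.Set.update]
  | succ n ih =>
    intro x y s
    rw [List.range_succ]
    rw [List.foldl_append, ih]
    simp only [List.foldl_cons, List.foldl_nil, List.map_append, List.map_cons,
      List.map_nil, PySem.Set.update, List.foldl_append, pvStepA]
    push_cast
    ring_nf

theorem points_in_circle_spec : Claim_equal_points_in_circle := by
  intro c d _
  unfold Spec_points_in_circle
  by_cases hd0 : d = 0
  · subst hd0; simp [points_in_circle, points_in_circle_alt]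
  · rcases lt_or_gt_of_ne hd0 with hneg | hpos
    · -- d < 0: the inner range is empty, both sides are the empty set
      have hnil : PySem.List.pyRange 1 (d + 1) 1 = [] :=
        PySem.List.pyRange_one_eq_nil (by omega)
      unfold points_in_circle points_in_circle_alt
      rw [if_neg hd0, if_neg hd0]
      simp [hnil, pvDirs, pvEdges, PySem.Set.empty, PySem.Set.ofList]
    · -- d > 0
      have hr : PySem.List.pyRange 1 (d + 1) 1
          = (List.range d.toNat).map (fun (k : Nat) => 1 + (k : Int)) := by
        rw [PySem.List.pyRange_one]
        norm_num
      have hg : PySem.List.pyGetD pvDirs 4 ((0 : Int), (0 : Int)) = (-1, 0) := by decide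
      unfold points_in_circle points_in_circle_alt
      rw [if_neg hd0, if_neg hd0]
      rw [hg]
      simp only [pvDirs, pvEdges, List.foldl_cons, List.foldl_nil, List.flatMap_cons,
        List.flatMap_nil, hr, List.foldl_map, List.map_map]
      simp only [pv_innerA]
      simp only [Int.toNat_of_nonneg hpos.le]
      simp only [PySem.Set.update, PySem.Set.ofList_eq_foldl, PySem.Set.empty,
        List.foldl_append, List.append_nil]
      repeat apply pv_foldl_add_congr
      all_goals first
        | rfl
        | (congr 1; funext k; simp only [Function.comp_apply, Prod.mk.injEq];
           constructor <;> push_cast <;> ring)
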